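-- pv_equiv track=rewrite | github.com/machen12345/case-history | views.py | myjieba
-- ===== SOURCE A (Python) =====
-- def fx(s,r):
--     if len(s) == 1:
--         r.append(s[0])
--     else:
--         # 处理交叉
--         if s[0][1]>=s[1][0] and s[0][1]<=s[1][1] and s[1][0]>s[0][0]:
--             s.remove(s[1])
--         # 处理包含
--         elif s[0][1]>=s[1][1]:
--             s.remove(s[1])
--         elif s[0][0]>=s[1][0] and s[0][1]<=s[1][1]:
--             s.remove(s[0])
--         # 既不包含也不交叉
--         else:
--             r.append(s[0])
--             s.remove(s[0])
--         fx(s, r)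
--     return r
--
-- def mysort(s):
--     for i in range(1, len(s)):
--         for j in range(0, i):
--             if s[i][0] < s[j][0]:
--                 temp = s[j]
--                 s[j] = s[i]
--                 s[i] = temp
--                 break
--             else:
--                 continue
--     return s
--
-- def myjieba(s, kList):
--     s = s.strip()
--     indexLis = []
--     resultLis = []
--     r = []
--     # kList = list(kList)
--     indexLis_1 = list()
--     for key in kList:
--         index = s.find(key)
--         indexLis.append([index,index+len(key)])
--     for i in range(len(indexLis)):
--         if indexLis[i][0]!=-1:
--             indexLis_1.append(indexLis[i])
--     if indexLis_1:
--         # 按照开始索引进行排序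
--         indexLis = mysort(indexLis_1)
--         # 处理关键字包含或交叉的特殊情况
--         indexLis = fx(indexLis,r)
--         for i in range(len(indexLis)):
--             if i < (len(indexLis)-1):
--                 index1 = indexLis[i][0]
--                 index1_1 = indexLis[i][1]
--                 index2 = indexLis[i+1][0]
--                 str1 = s[index1:index1_1]+'  '+s[index1_1:index2]
--                 resultLis.append(str1)
--         index3 = indexLis[-1][0]
--         index3_3 = indexLis[-1][1]
--         str2 = s[index3:index3_3]+'  '+s[index3_3:]
--         resultLis.append(str2)
--     else:
--         resultLis.append(s)
--     return resultLis
-- ===== SOURCE B (Python) =====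
-- # B: inline -1 filtering while building spans, an iterative single-pass overlap
-- # merge with a current span instead of recursion with list.remove, and the output
-- # built by zipping consecutive kept spans; the ordering pass is unchanged.
-- def mysort(s):
--     for i in range(1, len(s)):
--         for j in range(0, i):
--             if s[i][0] < s[j][0]:
--                 temp = s[j]
--                 s[j] = s[i]
--                 s[i] = temp
--                 break
--             else:
--                 continue
--     return s
--
-- def myjieba(s, kList):
--     s = s.strip()
--     spans = []
--     for key in kList:
--         i = s.find(key)
--         if i != -1:
--             spans.append([i, i + len(key)])
--     if not spans:
--         return [s]
--     spans = mysort(spans)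
--     kept = []
--     cur = spans[0]
--     for b in spans[1:]:
--         if (b[0] <= cur[1] <= b[1] and b[0] > cur[0]) or cur[1] >= b[1]:
--             continue
--         elif cur[0] >= b[0] and cur[1] <= b[1]:
--             cur = b
--         else:
--             kept.append(cur)
--             cur = b
--     kept.append(cur)
--     out = [s[a[0]:a[1]] + '  ' + s[a[1]:b[0]] for a, b in zip(kept, kept[1:])]
--     out.append(s[kept[-1][0]:kept[-1][1]] + '  ' + s[kept[-1][1]:])
--     return out
-- ===== Notes on version B (the rewrite author's own statement) =====
-- stated objective: alternative
-- what changed: Spans with find()==-1 are filtered inline while building instead of in a second index loop, the recursive fx that repeatedly mutates the span list with list.remove becomes a single iterative left-to-right pass keeping a current span, and the index-based output loop becomes a zip over consecutive kept spans; the ordering pass mysort is kept unchanged.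
import Mathlib
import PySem

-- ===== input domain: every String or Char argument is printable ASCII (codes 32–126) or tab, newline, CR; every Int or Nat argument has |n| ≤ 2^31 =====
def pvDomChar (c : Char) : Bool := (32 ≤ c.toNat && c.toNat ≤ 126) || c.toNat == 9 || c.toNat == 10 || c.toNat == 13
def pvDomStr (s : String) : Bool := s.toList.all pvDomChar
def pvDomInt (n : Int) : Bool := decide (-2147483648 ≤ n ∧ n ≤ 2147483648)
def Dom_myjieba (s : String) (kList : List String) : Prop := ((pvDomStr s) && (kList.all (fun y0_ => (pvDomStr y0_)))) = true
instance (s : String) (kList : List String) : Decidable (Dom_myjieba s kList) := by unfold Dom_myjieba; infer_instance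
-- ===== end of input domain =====

-- B filters -1 spans inline while building them, replaces the recursive in-place fx
-- (list.remove) by a single iterative pass keeping a current span, and builds the
-- output by zipping consecutive kept spans; the ordering pass mysort is unchanged
-- (both Pythons contain it verbatim, so both ports share its transliteration mysortP).
-- Objective: alternative. Return-value equivalence only: Python A mutates its local
-- lists, which is not observable by the caller.

-- ===== shared helper: mysort (identical source in A and B) =====
-- the inner 'for j in range(0, i): … break' of mysort
def mysortInnerP (s : List (Int × Int)) (i : Int) : List Int → List (Int × Int)
  | [] => s
  | j :: js =>
    if (PySem.List.pyGetD s i ((0 : Int), (0 : Int))).1 <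
       (PySem.List.pyGetD s j ((0 : Int), (0 : Int))).1 then
      PySem.List.pySetD
        (PySem.List.pySetD s j (PySem.List.pyGetD s i ((0 : Int), (0 : Int))))
        i (PySem.List.pyGetD s j ((0 : Int), (0 : Int)))
    else mysortInnerP s i js

def mysortP (s : List (Int × Int)) : List (Int × Int) :=
  (PySem.List.pyRange 1 (s.length : Int) 1).foldl
    (fun acc i => mysortInnerP acc i (PySem.List.pyRange 0 i 1)) s

-- ===== PORT A =====
-- spans [start, end] are ported as pairs (start, end) : Int × Int

-- list.remove(v) on a list that contains v (the only way A calls it)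
def pvRemoveD (xs : List (Int × Int)) (v : Int × Int) : List (Int × Int) :=
  (PySem.List.remove? xs v).getD xs

-- termination of fxA: remove of a member shortens the list (cited in decreasing_by)
theorem pvRemoveD_length_lt (xs : List (Int × Int)) (v : Int × Int) (h : v ∈ xs) :
    (pvRemoveD xs v).length < xs.length := by
  have hx : 0 < xs.length := List.length_pos_of_mem h
  rw [pvRemoveD, PySem.List.remove?_eq_some_erase xs v h]
  simp [List.length_erase_of_mem h]
  omega

-- fx(s, r): recursive merge mutating s, appending kept spans to r
def fxA (s r : List (Int × Int)) : List (Int × Int) :=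
  match s with
  | [] => r  -- unreachable: A never calls fx on an empty list (Python would raise)
  | [a] => r ++ [a]
  | a :: b :: rest =>
    if a.2 ≥ b.1 ∧ a.2 ≤ b.2 ∧ b.1 > a.1 then
      fxA (pvRemoveD (a :: b :: rest) b) r
    else if a.2 ≥ b.2 then
      fxA (pvRemoveD (a :: b :: rest) b) r
    else if a.1 ≥ b.1 ∧ a.2 ≤ b.2 then
      fxA (pvRemoveD (a :: b :: rest) a) r
    else
      fxA (pvRemoveD (a :: b :: rest) a) (r ++ [a])
termination_by s.length
decreasing_by
  · exact pvRemoveD_length_lt _ _ (by simp)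
  · exact pvRemoveD_length_lt _ _ (by simp)
  · exact pvRemoveD_length_lt _ _ (by simp)
  · exact pvRemoveD_length_lt _ _ (by simp)

def myjieba (s : String) (kList : List String) : List String :=
  let cs := PySem.Chars.strip s.toList
  let indexLis := kList.foldl (fun acc key =>
    let index := PySem.Chars.find cs key.toList
    acc ++ [(index, index + (key.toList.length : Int))]) []
  let indexLis1 := (PySem.List.pyRange 0 (indexLis.length : Int) 1).foldl
    (fun acc i =>
      if (PySem.List.pyGetD indexLis i ((0 : Int), (0 : Int))).1 ≠ -1 then
        acc ++ [PySem.List.pyGetD indexLis i ((0 : Int), (0 : Int))]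
      else acc) []
  if indexLis1 ≠ [] then
    let il := fxA (mysortP indexLis1) []
    let resultLis := (PySem.List.pyRange 0 (il.length : Int) 1).foldl
      (fun acc i =>
        if i < (il.length : Int) - 1 then
          let p := PySem.List.pyGetD il i ((0 : Int), (0 : Int))
          let q := PySem.List.pyGetD il (i + 1) ((0 : Int), (0 : Int))
          acc ++ [String.ofList (PySem.Chars.slice cs (some p.1) (some p.2) ++
            [' ', ' '] ++ PySem.Chars.slice cs (some p.2) (some q.1))]
        else acc) []
    let p := PySem.List.pyGetD il (-1) ((0 : Int), (0 : Int))
    resultLis ++ [String.ofList (PySem.Chars.slice cs (some p.1) (some p.2) ++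
      [' ', ' '] ++ PySem.Chars.slice cs (some p.2) none)]
  else [String.ofList cs]

-- ===== PORT B =====
-- one iterative pass: compare the current span with each following one
def mergeB (cur : Int × Int) (rest kept : List (Int × Int)) : List (Int × Int) :=
  match rest with
  | [] => kept ++ [cur]
  | b :: bs =>
    if (b.1 ≤ cur.2 ∧ cur.2 ≤ b.2 ∧ b.1 > cur.1) ∨ cur.2 ≥ b.2 then
      mergeB cur bs kept
    else if cur.1 ≥ b.1 ∧ cur.2 ≤ b.2 then
      mergeB b bs kept
    else
      mergeB b bs (kept ++ [cur])

def myjieba_alt (s : String) (kList : List String) : List String :=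
  let cs := PySem.Chars.strip s.toList
  let spans := kList.foldl (fun acc key =>
    let i := PySem.Chars.find cs key.toList
    if i ≠ -1 then acc ++ [(i, i + (key.toList.length : Int))] else acc) []
  if spans = [] then [String.ofList cs]
  else
    let ordered := mysortP spans
    let kept := match ordered with
      | [] => []  -- unreachable: mysort preserves the (nonzero) length
      | c :: tl => mergeB c tl []
    let out := (kept.zip (PySem.List.slice kept (some 1) none)).map (fun ab =>
      String.ofList (PySem.Chars.slice cs (some ab.1.1) (some ab.1.2) ++
        [' ', ' '] ++ PySem.Chars.slice cs (some ab.1.2) (some ab.2.1)))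
    let p := PySem.List.pyGetD kept (-1) ((0 : Int), (0 : Int))
    out ++ [String.ofList (PySem.Chars.slice cs (some p.1) (some p.2) ++
      [' ', ' '] ++ PySem.Chars.slice cs (some p.2) none)]

-- ===== PRECONDITION & SPEC =====
def Spec_myjieba (s : String) (kList : List String) (out : List String) : Prop := out = myjieba_alt s kList
instance (s : String) (kList : List String) (out : List String) : Decidable (Spec_myjieba s kList out) := by unfold Spec_myjieba; infer_instance

-- ===== CLAIM (what is proved, stated in full; the proofs are below) =====
def Claim_equal_myjieba : Prop := ∀ (s : String) (kList : List String), Dom_myjieba s kList → Spec_myjieba s kList (myjieba s kList)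

-- ===== LEMMAS AND PROOFS =====

theorem pv_length_mysortInnerP (i : Int) (js : List Int) : ∀ (s : List (Int × Int)),
    (mysortInnerP s i js).length = s.length := by
  induction js with
  | nil => intro s; simp [mysortInnerP]
  | cons j js ih =>
    intro s
    rw [mysortInnerP]
    split
    · simp [PySem.List.length_pySetD]
    · exact ih s

theorem pv_length_mysortP (s : List (Int × Int)) :
    (mysortP s).length = s.length := by
  rw [mysortP]
  generalize PySem.List.pyRange 1 (s.length : Int) 1 = l
  induction l generalizing s with
  | nil => simp
  | cons i is ih =>
    simp only [List.foldl_cons]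
    rw [ih, pv_length_mysortInnerP]

theorem pv_spans_eq (cs : List Char) (kList : List String) :
    (kList.foldl (fun acc key => acc ++ [(PySem.Chars.find cs key.toList,
        PySem.Chars.find cs key.toList + (key.toList.length : Int))]) []).foldl
      (fun acc p => if p.1 ≠ -1 then acc ++ [p] else acc) []
    = kList.foldl (fun acc key =>
        if PySem.Chars.find cs key.toList ≠ -1 then
          acc ++ [(PySem.Chars.find cs key.toList,
            PySem.Chars.find cs key.toList + (key.toList.length : Int))]
        else acc) [] := by
  rw [PySem.List.foldl_append_singleton_eq_map
    (fun key => (PySem.Chars.find cs key.toList,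
      PySem.Chars.find cs key.toList + (key.toList.length : Int))) kList [],
    List.nil_append, List.foldl_map]

theorem pv_removeD_cons_self (a : Int × Int) (rest : List (Int × Int)) :
    pvRemoveD (a :: rest) a = rest := by
  simp [pvRemoveD, PySem.List.remove?_cons_self]

theorem pv_removeD_cons_snd (a b : Int × Int) (rest : List (Int × Int)) :
    pvRemoveD (a :: b :: rest) b = a :: rest := by
  by_cases h : a = b
  · subst h; simp [pvRemoveD, PySem.List.remove?_cons_self]
  · simp [pvRemoveD, PySem.List.remove?_cons_of_ne _ h, PySem.List.remove?_cons_self]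

theorem pv_fx_eq_merge (tl : List (Int × Int)) : ∀ (c : Int × Int) (r : List (Int × Int)),
    fxA (c :: tl) r = mergeB c tl r := by
  induction tl with
  | nil => intro c r; simp [fxA, mergeB]
  | cons b bs ih =>
    intro c r
    rw [fxA, mergeB]
    by_cases h1 : c.2 ≥ b.1 ∧ c.2 ≤ b.2 ∧ b.1 > c.1
    · rw [if_pos h1, pv_removeD_cons_snd, ih, if_pos (Or.inl ⟨h1.1, h1.2.1, h1.2.2⟩)]
    · rw [if_neg h1]
      by_cases h2 : c.2 ≥ b.2
      · rw [if_pos h2, pv_removeD_cons_snd, ih, if_pos (Or.inr h2)]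
      · rw [if_neg h2]
        have hno : ¬ ((b.1 ≤ c.2 ∧ c.2 ≤ b.2 ∧ b.1 > c.1) ∨ c.2 ≥ b.2) := by
          rintro (⟨x1, x2, x3⟩ | x)
          · exact h1 ⟨x1, x2, x3⟩
          · exact h2 x
        rw [if_neg hno]
        by_cases h3 : c.1 ≥ b.1 ∧ c.2 ≤ b.2
        · rw [if_pos h3, pv_removeD_cons_self, ih, if_pos h3]
        · rw [if_neg h3, pv_removeD_cons_self, ih, if_neg h3]

theorem pv_out_loop (F : (Int × Int) → (Int × Int) → String) (il : List (Int × Int)) :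
    ∀ (k t : Nat), il.length ≤ t + k → ∀ (acc : List String),
    (PySem.List.pyRange (t : Int) (il.length : Int) 1).foldl
      (fun acc i =>
        if i < (il.length : Int) - 1 then
          acc ++ [F (PySem.List.pyGetD il i ((0 : Int), (0 : Int)))
                    (PySem.List.pyGetD il (i + 1) ((0 : Int), (0 : Int)))]
        else acc) acc
    = acc ++ ((il.drop t).zip (il.drop (t + 1))).map (fun ab => F ab.1 ab.2) := by
  intro k
  induction k with
  | zero =>
    intro t ht acc
    rw [PySem.List.pyRange_one_eq_nil (by exact_mod_cast ht)]
    have hd : il.drop t = [] := List.drop_eq_nil_of_le (by omega)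
    simp [hd]
  | succ k ih =>
    intro t ht acc
    by_cases hlt : t < il.length
    · rw [PySem.List.pyRange_one_cons (by exact_mod_cast hlt)]
      simp only [List.foldl_cons]
      by_cases hlast : t + 1 < il.length
      · rw [if_pos (by omega)]
        have hget : PySem.List.pyGetD il ((t : Int)) ((0 : Int), (0 : Int)) = il[t] := by
          rw [PySem.List.pyGetD_natCast]; exact List.getD_eq_getElem _ _ hlt
        have hget2 : PySem.List.pyGetD il ((t : Int) + 1) ((0 : Int), (0 : Int)) = il[t + 1] := by
          rw [show ((t : Int) + 1) = ((t + 1 : Nat) : Int) by push_cast; ring,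
            PySem.List.pyGetD_natCast]
          exact List.getD_eq_getElem _ _ hlast
        rw [hget, hget2, show ((t : Int) + 1) = ((t + 1 : Nat) : Int) by push_cast; ring,
          ih (t + 1) (by omega)]
        rw [List.drop_eq_getElem_cons hlt, List.drop_eq_getElem_cons hlast]
        simp only [List.zip_cons_cons, List.map_cons, List.append_assoc, List.singleton_append]
      · rw [if_neg (by omega)]
        rw [show ((t : Int) + 1) = ((t + 1 : Nat) : Int) by push_cast; ring, ih (t + 1) (by omega)]
        have h1 : il.drop (t + 1) = [] := List.drop_eq_nil_of_le (by omega)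
        have h2 : il.drop (t + 2) = [] := List.drop_eq_nil_of_le (by omega)
        simp [h1, h2]
    · rw [PySem.List.pyRange_one_eq_nil (by exact_mod_cast Nat.le_of_not_lt hlt)]
      have hd : il.drop t = [] := List.drop_eq_nil_of_le (by omega)
      simp [hd]

theorem pv_main (s : String) (kList : List String) : myjieba s kList = myjieba_alt s kList := by
  unfold myjieba myjieba_alt
  simp only []
  set cs := PySem.Chars.strip s.toList with hcs
  rw [PySem.List.foldl_pyRange_zero_pyGetD'
    (kList.foldl (fun acc key => acc ++ [(PySem.Chars.find cs key.toList,
      PySem.Chars.find cs key.toList + (key.toList.length : Int))]) [])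
    ((0 : Int), (0 : Int)) (fun acc p => if p.1 ≠ -1 then acc ++ [p] else acc) []]
  rw [pv_spans_eq cs kList]
  set sp := kList.foldl (fun acc key =>
    if PySem.Chars.find cs key.toList ≠ -1 then
      acc ++ [(PySem.Chars.find cs key.toList,
        PySem.Chars.find cs key.toList + (key.toList.length : Int))]
    else acc) [] with hspdef
  by_cases hsp : sp = []
  · simp [hsp]
  · rw [if_pos hsp, if_neg hsp]
    obtain ⟨c, tl, hctl⟩ : ∃ c tl, mysortP sp = c :: tl := by
      rcases h : mysortP sp with _ | ⟨c, tl⟩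
      · exfalso
        have hlen := pv_length_mysortP sp
        rw [h] at hlen
        simp at hlen
        exact hsp (List.eq_nil_of_length_eq_zero hlen.symm)
      · exact ⟨c, tl, rfl⟩
    rw [hctl, pv_fx_eq_merge]
    simp only []
    set kept := mergeB c tl [] with hkept
    have hout := pv_out_loop (fun p q => String.ofList (PySem.Chars.slice cs (some p.1)
      (some p.2) ++ [' ', ' '] ++ PySem.Chars.slice cs (some p.2) (some q.1)))
      kept kept.length 0 (by omega) []
    simp only [Nat.cast_zero] at hout
    rw [hout]
    simp [PySem.List.slice_from_one, List.drop_one]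

-- ===== VERDICT (by name: the statement is the Claim_ definition above) =====
theorem myjieba_spec : Claim_equal_myjieba := by
  intro s kList _
  exact pv_main s kList
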